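-- pv_equiv track=rewrite | github.com/ToluwaniO/ITI1120 | a2_8677256/a2_8677256.py | stranger_things
-- ===== SOURCE A (Python) =====
-- def stranger_things(l1,l2):
--     if len(l1) == len(l2):
--         for i in range(0, len(l1)):
--             if i%2 == 0:
--                 if (l1[i]!=l2[i]):
--                     return False
--             else:
--                 if (l1[i]==l2[i]):
--                     return False
--
--     else:
--         return False
--
--     return True
-- ===== SOURCE B (Python) =====
-- def stranger_things(l1, l2):
--     if len(l1) != len(l2):
--         return False
--     pairs = list(enumerate(zip(l1, l2)))
--     evens = [p for i, p in pairs if i % 2 == 0]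
--     odds = [p for i, p in pairs if i % 2 == 1]
--     return all(a == b for a, b in evens) and all(a != b for a, b in odds)
-- ===== Notes on version B (the rewrite author's own statement) =====
-- stated objective: alternative
-- what changed: Replaces A's single interleaved index loop with early returns by regrouping the zipped pairs by index parity into two lists and running two separate all() passes (equality on even positions, inequality on odd positions).
import Mathlib
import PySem

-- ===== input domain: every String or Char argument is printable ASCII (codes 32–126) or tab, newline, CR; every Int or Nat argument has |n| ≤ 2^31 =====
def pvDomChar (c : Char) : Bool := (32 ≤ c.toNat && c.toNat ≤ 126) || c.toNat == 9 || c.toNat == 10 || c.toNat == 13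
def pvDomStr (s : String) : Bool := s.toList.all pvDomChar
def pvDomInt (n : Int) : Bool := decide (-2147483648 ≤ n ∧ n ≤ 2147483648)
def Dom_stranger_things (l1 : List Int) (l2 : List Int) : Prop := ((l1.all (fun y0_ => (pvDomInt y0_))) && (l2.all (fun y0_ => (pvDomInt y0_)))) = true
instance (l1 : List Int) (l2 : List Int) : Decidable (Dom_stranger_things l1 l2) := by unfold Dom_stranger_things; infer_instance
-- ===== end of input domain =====

-- B regroups the zipped pairs by index parity and checks the two groups in separate passes,
-- instead of A's single interleaved index loop with early returns; alternative decomposition, same cost.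


-- ===== PORT A =====
-- the for-loop over range(0, len(l1)) with its two early `return False`s
def strangerLoop (l1 : List Int) (l2 : List Int) : List Int → Bool
  | [] => true
  | i :: rest =>
    if PySem.Int.mod i 2 = 0 then
      if PySem.List.pyGetD l1 i 0 ≠ PySem.List.pyGetD l2 i 0 then false
      else strangerLoop l1 l2 rest
    else
      if PySem.List.pyGetD l1 i 0 = PySem.List.pyGetD l2 i 0 then false
      else strangerLoop l1 l2 rest

def stranger_things (l1 : List Int) (l2 : List Int) : Bool :=
  if l1.length = l2.length then
    strangerLoop l1 l2 (PySem.List.pyRange 0 (l1.length : Int) 1)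
  else false

-- ===== PORT B =====
def stranger_things_alt (l1 : List Int) (l2 : List Int) : Bool :=
  if l1.length ≠ l2.length then false
  else
    ((PySem.List.enumerate (List.zip l1 l2) 0).filter
        (fun ip => PySem.Int.mod ip.1 2 == 0)).all (fun ip => ip.2.1 == ip.2.2)
    && ((PySem.List.enumerate (List.zip l1 l2) 0).filter
        (fun ip => PySem.Int.mod ip.1 2 == 1)).all (fun ip => ip.2.1 != ip.2.2)

-- ===== PRECONDITION & SPEC =====
def Spec_stranger_things (l1 : List Int) (l2 : List Int) (out : Bool) : Prop := out = stranger_things_alt l1 l2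
instance (l1 : List Int) (l2 : List Int) (out : Bool) : Decidable (Spec_stranger_things l1 l2 out) := by unfold Spec_stranger_things; infer_instance

-- ===== CLAIM (what is proved, stated in full; the proofs are below) =====
def Claim_equal_stranger_things : Prop := ∀ (l1 : List Int) (l2 : List Int), Dom_stranger_things l1 l2 → Spec_stranger_things l1 l2 (stranger_things l1 l2)

-- ===== LEMMAS AND PROOFS =====

-- common middle form: walk the zipped pairs with an alternating parity flag
def chkP : Bool → List (Int × Int) → Bool
  | _, [] => true
  | p, (a, b) :: ps => ((a == b) == p) && chkP (!p) ps

lemma loopA_eq (l1 l2 : List Int) (hlen : l1.length = l2.length) :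
    ∀ (m a : Nat), l1.length - a = m →
      strangerLoop l1 l2 (PySem.List.pyRange (a : Int) (l1.length : Int) 1)
        = chkP (a % 2 == 0) (List.zip (l1.drop a) (l2.drop a)) := by
  intro m
  induction m with
  | zero =>
    intro a ha
    have hle : l1.length ≤ a := by omega
    rw [PySem.List.pyRange_one_eq_nil (by exact_mod_cast hle)]
    rw [List.drop_eq_nil_of_le hle]
    simp [strangerLoop, chkP]
  | succ m ih =>
    intro a ha
    have hlt : a < l1.length := by omega
    have hlt2 : a < l2.length := by omega
    rw [PySem.List.pyRange_one_cons (by exact_mod_cast hlt)]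
    rw [List.drop_eq_getElem_cons hlt, List.drop_eq_getElem_cons hlt2, List.zip_cons_cons]
    have hcast : ((a : Int) + 1) = ((a + 1 : Nat) : Int) := by push_cast; ring
    have hmod : PySem.Int.mod (a : Int) 2 = ((a % 2 : Nat) : Int) := by
      exact_mod_cast PySem.Int.mod_natCast a 2
    have hg1 : PySem.List.pyGetD l1 (a : Int) 0 = l1[a] := by
      simp [PySem.List.pyGetD_natCast, List.getD_eq_getElem?_getD, hlt]
    have hg2 : PySem.List.pyGetD l2 (a : Int) 0 = l2[a] := by
      simp [PySem.List.pyGetD_natCast, List.getD_eq_getElem?_getD, hlt2]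
    have hrec := ih (a + 1) (by omega)
    rw [← hcast] at hrec
    rcases Nat.mod_two_eq_zero_or_one a with hp | hp
    · have hcond : PySem.Int.mod (a : Int) 2 = 0 := by rw [hmod, hp]; simp
      have hfl : ((a % 2 : Nat) == 0) = true := by rw [hp]; decide
      have hfl1 : (((a + 1) % 2 : Nat) == 0) = false := by
        rw [show (a + 1) % 2 = 1 by omega]; decide
      rw [hfl1] at hrec
      simp only [strangerLoop]
      rw [if_pos hcond, hg1, hg2]
      simp only [chkP, hfl, Bool.not_true]
      by_cases hv : l1[a] = l2[a]
      · rw [if_neg (by simp [hv]), hrec]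
        simp [hv]
      · rw [if_pos hv]
        simp [hv]
    · have hcond : ¬ PySem.Int.mod (a : Int) 2 = 0 := by rw [hmod, hp]; decide
      have hfl : ((a % 2 : Nat) == 0) = false := by rw [hp]; decide
      have hfl1 : (((a + 1) % 2 : Nat) == 0) = true := by
        rw [show (a + 1) % 2 = 0 by omega]; decide
      rw [hfl1] at hrec
      simp only [strangerLoop]
      rw [if_neg hcond, hg1, hg2]
      simp only [chkP, hfl, Bool.not_false]
      by_cases hv : l1[a] = l2[a]
      · rw [if_pos hv]
        simp [hv]
      · rw [if_neg hv, hrec]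
        simp [hv]

lemma alt_eq : ∀ (ps : List (Int × Int)) (s : Nat),
    (((PySem.List.enumerate ps (s : Int)).filter (fun ip => PySem.Int.mod ip.1 2 == 0)).all
        (fun ip => ip.2.1 == ip.2.2)
      && ((PySem.List.enumerate ps (s : Int)).filter (fun ip => PySem.Int.mod ip.1 2 == 1)).all
        (fun ip => ip.2.1 != ip.2.2))
    = chkP (s % 2 == 0) ps := by
  intro ps
  induction ps with
  | nil => intro s; simp [PySem.List.enumerate_nil, chkP]
  | cons hd tl ih =>
    intro s
    obtain ⟨a, b⟩ := hd
    rw [PySem.List.enumerate_cons]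
    have hcast : ((s : Int) + 1) = ((s + 1 : Nat) : Int) := by push_cast; ring
    have hmod : PySem.Int.mod (s : Int) 2 = ((s % 2 : Nat) : Int) := by
      exact_mod_cast PySem.Int.mod_natCast s 2
    have hrec := ih (s + 1)
    rw [← hcast] at hrec
    rcases Nat.mod_two_eq_zero_or_one s with hp | hp
    · have hp1 : (s + 1) % 2 = 1 := by omega
      rw [hp1] at hrec
      have hpos : ((fun (ip : Int × Int × Int) => PySem.Int.mod ip.1 2 == 0) ((s : Int), a, b)) = true := by
        show (PySem.Int.mod (s : Int) 2 == 0) = true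
        rw [hmod, hp]; decide
      have hneg : ¬ ((fun (ip : Int × Int × Int) => PySem.Int.mod ip.1 2 == 1) ((s : Int), a, b)) = true := by
        show ¬ (PySem.Int.mod (s : Int) 2 == 1) = true
        rw [hmod, hp]; decide
      rw [List.filter_cons_of_pos (p := fun (ip : Int × Int × Int) => PySem.Int.mod ip.1 2 == 0) hpos,
        List.filter_cons_of_neg (p := fun (ip : Int × Int × Int) => PySem.Int.mod ip.1 2 == 1) hneg, List.all_cons]
      simp only [chkP, hp]
      rw [Bool.and_assoc, hrec]
      simp
    · have hp1 : (s + 1) % 2 = 0 := by omega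
      rw [hp1] at hrec
      have hpos : ((fun (ip : Int × Int × Int) => PySem.Int.mod ip.1 2 == 1) ((s : Int), a, b)) = true := by
        show (PySem.Int.mod (s : Int) 2 == 1) = true
        rw [hmod, hp]; decide
      have hneg : ¬ ((fun (ip : Int × Int × Int) => PySem.Int.mod ip.1 2 == 0) ((s : Int), a, b)) = true := by
        show ¬ (PySem.Int.mod (s : Int) 2 == 0) = true
        rw [hmod, hp]; decide
      rw [List.filter_cons_of_neg (p := fun (ip : Int × Int × Int) => PySem.Int.mod ip.1 2 == 0) hneg,
        List.filter_cons_of_pos (p := fun (ip : Int × Int × Int) => PySem.Int.mod ip.1 2 == 1) hpos, List.all_cons]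
      simp only [chkP, hp]
      rw [Bool.and_left_comm, hrec]
      simp [bne]

-- ===== VERDICT (by name: the statement is the Claim_ definition above) =====
theorem stranger_things_spec : Claim_equal_stranger_things := by
  intro l1 l2 _
  unfold Spec_stranger_things stranger_things stranger_things_alt
  by_cases h : l1.length = l2.length
  · have hA := loopA_eq l1 l2 h (l1.length - 0) 0 rfl
    have hB := alt_eq (List.zip l1 l2) 0
    rw [Nat.cast_zero, List.drop_zero, List.drop_zero] at hA
    rw [Nat.cast_zero] at hB
    rw [if_pos h, if_neg (by simpa using h), hA, ← hB]
  · rw [if_neg h, if_pos h]
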